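-- pv_equiv track=rewrite | github.com/ArthurDentt/CliffordSim | tableau_cls.py | _row_to_str
-- ===== SOURCE A (Python) =====
-- def _row_to_str(rowvec):
--     """ row to string method for printing out a stab or destab from a tableau row """
--     n = (len(rowvec))//2
--     operator = '-' if rowvec[-1] else '+'   # is negative bit present
--     for i in range(n):
--         if rowvec[i]:                       # if Z Stabilizer component is present
--             if rowvec[i+n]:                 # if X Stabilizer component is also present
--                 operator += 'Y'
--             else:
--                 operator += 'Z'
--         elif rowvec[i+n]:                   # if only X Stabilizer component is present
--             operator += 'X'
--         else:                               # if none are present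
--             operator += 'I'
--     return operator
-- ===== SOURCE B (Python) =====
-- def _row_to_str(rowvec):
--     """Staged-overwrite rewrite: start from an all-identity char array, overwrite
--     with 'Z' where the Z-half is set in one pass, then upgrade with the X-half in
--     a second pass ('I'->'X', 'Z'->'Y'), instead of deciding each qubit's letter
--     with a nested if/elif tree in a single appending loop."""
--     n = len(rowvec) // 2
--     body = ['I'] * n
--     for i in range(n):
--         if rowvec[i]:
--             body[i] = 'Z'
--     for i in range(n):
--         if rowvec[n + i]:
--             body[i] = 'Y' if body[i] == 'Z' else 'X'
--     return ('-' if rowvec[-1] else '+') + ''.join(body)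
-- ===== Notes on version B (the rewrite author's own statement) =====
-- stated objective: alternative
-- what changed: Instead of a single appending loop with a nested if/elif decision tree, B starts from a mutable all-'I' char array and performs two staged in-place passes: first overwriting 'Z' wherever the Z-half bit is set, then upgrading each position with the X-half ('I'->'X', 'Z'->'Y'), joining at the end.
import Mathlib
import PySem

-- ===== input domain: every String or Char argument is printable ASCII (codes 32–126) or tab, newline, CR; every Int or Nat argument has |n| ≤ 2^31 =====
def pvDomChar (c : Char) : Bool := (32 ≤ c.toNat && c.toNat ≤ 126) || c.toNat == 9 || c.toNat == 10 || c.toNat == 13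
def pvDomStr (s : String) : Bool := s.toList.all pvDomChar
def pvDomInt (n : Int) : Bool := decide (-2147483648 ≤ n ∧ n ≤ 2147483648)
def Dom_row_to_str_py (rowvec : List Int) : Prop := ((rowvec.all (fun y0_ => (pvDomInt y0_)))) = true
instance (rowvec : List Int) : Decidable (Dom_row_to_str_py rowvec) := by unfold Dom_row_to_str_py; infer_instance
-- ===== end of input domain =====

-- B replaces A's appending loop with a nested if/elif tree by two staged in-place passes over
-- an all-'I' char array (overwrite 'Z' from the Z-half, then upgrade 'I'->'X' / 'Z'->'Y' from
-- the X-half); alternative decomposition, same cost.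

-- ===== PORT A =====
-- literal port of A: sign from rowvec[-1], then a loop over range(n) appending via the nested if/elif tree
def row_to_str_py (rowvec : List Int) : String :=
  let n : Nat := rowvec.length / 2
  let operator : String :=
    match PySem.List.pyGet? rowvec (-1) with
    | none => ""                    -- IndexError in Python; excluded by Pre_
    | some v => if v ≠ 0 then "-" else "+"
  (List.range n).foldl (fun op i =>
      if rowvec.getD i 0 ≠ 0 then         -- in-range index rowvec[i] (i < n ≤ len)
        if rowvec.getD (i + n) 0 ≠ 0 then op ++ "Y" else op ++ "Z"
      else if rowvec.getD (i + n) 0 ≠ 0 then op ++ "X"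
      else op ++ "I") operator

-- ===== PORT B =====
-- literal port of B: body := ['I'] * n; first pass sets body[i] := 'Z' where the Z-bit holds;
-- second pass sets body[i] := ('Y' if body[i]=='Z' else 'X') where the X-bit holds; sign + join
def row_to_str_py_alt (rowvec : List Int) : String :=
  let n : Nat := rowvec.length / 2
  let body0 : List Char := List.replicate n 'I'
  let body1 : List Char :=
    (List.range n).foldl (fun b i => if rowvec.getD i 0 ≠ 0 then b.set i 'Z' else b) body0
  let body2 : List Char :=
    (List.range n).foldl (fun b i =>
      if rowvec.getD (n + i) 0 ≠ 0 then
        b.set i (if b.getD i ' ' = 'Z' then 'Y' else 'X')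
      else b) body1
  let sign : String :=
    match PySem.List.pyGet? rowvec (-1) with
    | none => ""                    -- IndexError in Python; excluded by Pre_
    | some v => if v ≠ 0 then "-" else "+"
  sign ++ String.ofList body2

-- ===== PRECONDITION & SPEC =====
-- Pre_ excludes only the empty list, on which Python A raises IndexError (rowvec[-1]).
def Pre_row_to_str_py (rowvec : List Int) : Prop := rowvec ≠ []
instance (rowvec : List Int) : Decidable (Pre_row_to_str_py rowvec) := by unfold Pre_row_to_str_py; infer_instance
def pvWitness_row_to_str_py : List Int := [1, 0, 1, 0, 0]
def Spec_row_to_str_py (rowvec : List Int) (out : String) : Prop := out = row_to_str_py_alt rowvec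
instance (rowvec : List Int) (out : String) : Decidable (Spec_row_to_str_py rowvec out) := by unfold Spec_row_to_str_py; infer_instance

-- ===== CLAIM (what is proved, stated in full; the proofs are below) =====
def Claim_equal_row_to_str_py : Prop := ∀ (rowvec : List Int), Dom_row_to_str_py rowvec → Pre_row_to_str_py rowvec → Spec_row_to_str_py rowvec (row_to_str_py rowvec)

-- ===== LEMMAS AND PROOFS =====

-- getD after set: position i is overwritten exactly when it is in range
theorem getD_set_char (l : List Char) (i j : Nat) (a d : Char) :
    (l.set i a).getD j d = if j = i ∧ i < l.length then a else l.getD j d := by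
  rw [List.getD_eq_getElem?_getD, List.getElem?_set, List.getD_eq_getElem?_getD]
  by_cases h : i = j
  · subst h
    by_cases h2 : i < l.length <;> simp [h2]
  · rw [if_neg h, if_neg (fun hh : j = i ∧ i < l.length => h hh.1.symm)]

-- a pass that, at each index i of range m, conditionally overwrites position i using its
-- current value: length is preserved and position j gets g j (b.getD j) exactly when j < m ∧ c j
theorem pass_spec (c : Nat → Prop) [DecidablePred c] (g : Nat → Char → Char) :
    ∀ (m : Nat) (b : List Char), m ≤ b.length →
      (((List.range m).foldl (fun b i => if c i then b.set i (g i (b.getD i ' ')) else b) b).length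
          = b.length) ∧
      (∀ j, ((List.range m).foldl (fun b i => if c i then b.set i (g i (b.getD i ' ')) else b) b).getD j ' '
          = if j < m ∧ c j then g j (b.getD j ' ') else b.getD j ' ') := by
  intro m
  induction m with
  | zero =>
    intro b _
    constructor
    · rfl
    · intro j; simp
  | succ k ih =>
    intro b hm
    obtain ⟨ihlen, ihget⟩ := ih b (by omega)
    rw [List.range_succ, List.foldl_append, List.foldl_cons, List.foldl_nil]
    set fb := (List.range k).foldl (fun b i => if c i then b.set i (g i (b.getD i ' ')) else b) b with hfb
    have hkval : fb.getD k ' ' = b.getD k ' ' := by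
      rw [ihget k]; simp
    have hkl : k < fb.length := by rw [ihlen]; omega
    by_cases hc : c k
    · simp only [if_pos hc]
      constructor
      · rw [List.length_set, ihlen]
      · intro j
        rw [getD_set_char, hkval, ihget j]
        by_cases hj : j = k
        · subst hj
          rw [if_pos ⟨rfl, hkl⟩, if_pos ⟨Nat.lt_succ_self j, hc⟩]
        · have h1 : (j < k ∧ c j) ↔ (j < k + 1 ∧ c j) := by
            constructor
            · rintro ⟨h, hcj⟩; exact ⟨by omega, hcj⟩
            · rintro ⟨h, hcj⟩; exact ⟨by omega, hcj⟩
          rw [if_neg (fun hh : j = k ∧ k < fb.length => hj hh.1)]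
          exact if_congr h1 rfl rfl
    · simp only [if_neg hc]
      constructor
      · exact ihlen
      · intro j
        rw [ihget j]
        by_cases hj : j = k
        · subst hj
          rw [if_neg (fun hh : j < j ∧ c j => hc hh.2),
              if_neg (fun hh : j < j + 1 ∧ c j => hc hh.2)]
        · have h1 : (j < k ∧ c j) ↔ (j < k + 1 ∧ c j) := by
            constructor
            · rintro ⟨h, hcj⟩; exact ⟨by omega, hcj⟩
            · rintro ⟨h, hcj⟩; exact ⟨by omega, hcj⟩
          exact if_congr h1 rfl rfl

-- the appending loop over range n collects the per-index strings, in order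
theorem foldl_range_append (t : Nat → String) :
    ∀ (n : Nat) (s : String),
      (List.range n).foldl (fun op i => op ++ t i) s
        = s ++ String.ofList ((List.range n).flatMap (fun i => (t i).toList)) := by
  intro n
  induction n with
  | zero => intro s; apply String.ext; simp
  | succ m ih =>
    intro s
    rw [List.range_succ, List.foldl_append]
    simp only [List.foldl_cons, List.foldl_nil, ih]
    apply String.ext
    simp

-- the single character A appends at index i
def charA (rowvec : List Int) (n : Nat) (i : Nat) : Char :=
  if rowvec.getD i 0 ≠ 0 then
    if rowvec.getD (i + n) 0 ≠ 0 then 'Y' else 'Z'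
  else if rowvec.getD (i + n) 0 ≠ 0 then 'X'
  else 'I'

-- A's branchy step is the append of that one-character string
theorem stepA_eq (rowvec : List Int) (n : Nat) (op : String) (i : Nat) :
    (if rowvec.getD i 0 ≠ 0 then
        if rowvec.getD (i + n) 0 ≠ 0 then op ++ "Y" else op ++ "Z"
      else if rowvec.getD (i + n) 0 ≠ 0 then op ++ "X"
      else op ++ "I")
    = op ++ String.ofList [charA rowvec n i] := by
  unfold charA; split_ifs <;> rfl

-- flatMap of singleton lists is a map
theorem flatMap_single (f : Nat → Char) (m : Nat) :
    (List.range m).flatMap (fun i => (String.ofList [f i]).toList) = (List.range m).map f := by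
  induction m with
  | zero => rfl
  | succ k ih => rw [List.range_succ, List.flatMap_append, List.map_append, ih]; simp

theorem row_to_str_py_spec : Claim_equal_row_to_str_py := by
  unfold Claim_equal_row_to_str_py
  intro rowvec _ _
  unfold Spec_row_to_str_py row_to_str_py row_to_str_py_alt
  simp only []
  set n : Nat := rowvec.length / 2 with hn
  -- A side: collect the appending loop into sign ++ map charA
  have hstep :
      (fun (op : String) (i : Nat) =>
        if rowvec.getD i 0 ≠ 0 then
          if rowvec.getD (i + n) 0 ≠ 0 then op ++ "Y" else op ++ "Z"
        else if rowvec.getD (i + n) 0 ≠ 0 then op ++ "X"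
        else op ++ "I")
      = (fun (op : String) (i : Nat) => op ++ String.ofList [charA rowvec n i]) := by
    funext op i; exact stepA_eq rowvec n op i
  rw [hstep, foldl_range_append]
  congr 1
  rw [flatMap_single]
  -- B side: characterize the two staged passes
  have hrep : (List.replicate n 'I').length = n := List.length_replicate
  obtain ⟨len1, get1⟩ := pass_spec (fun i => rowvec.getD i 0 ≠ 0) (fun _ _ => 'Z')
      n (List.replicate n 'I') (by omega)
  set body1 := (List.range n).foldl
      (fun b i => if rowvec.getD i 0 ≠ 0 then b.set i 'Z' else b) (List.replicate n 'I') with hb1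
  obtain ⟨len2, get2⟩ := pass_spec (fun i => rowvec.getD (n + i) 0 ≠ 0)
      (fun _ v => if v = 'Z' then 'Y' else 'X') n body1 (by omega)
  set body2 := (List.range n).foldl
      (fun b i => if rowvec.getD (n + i) 0 ≠ 0 then b.set i (if b.getD i ' ' = 'Z' then 'Y' else 'X') else b)
      body1 with hb2
  congr 1
  apply List.ext_getElem
  · simp [len2, len1, hrep]
  · intro j h1 h2
    have hj : j < n := by simpa using h1
    have hget2 : body2.getD j ' ' = charA rowvec n j := by
      rw [get2 j, get1 j]
      have hrepj : (List.replicate n 'I').getD j ' ' = 'I' := by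
        rw [List.getD_eq_getElem?_getD, List.getElem?_replicate]; simp [hj]
      rw [hrepj]
      unfold charA
      have hcomm : j + n = n + j := by omega
      rw [hcomm]
      simp only [and_iff_right hj]
      split_ifs <;> simp_all
    have e1 : body2.getD j ' ' = body2[j]'h2 := by
      rw [List.getD_eq_getElem?_getD, List.getElem?_eq_getElem h2]; rfl
    have hmap : ((List.range n).map (charA rowvec n))[j]'h1 = charA rowvec n j := by
      simp
    rw [hmap, ← hget2, e1]
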